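-- pv_equiv track=rewrite | github.com/JuggleHacker/hijack_generator | complete_the_siteswap.py | filter_rotations
-- ===== SOURCE A (Python) =====
-- def filter_rotations(list_of_siteswaps):
--     """Takes in a list of siteswaps and removes any duplicates.
--     The same siteswap can be written starting with different throws.
--     For example: 441, 414 and 144 are all the same siteswap and this function
--     would remove all apart from one of these from an input list."""
--     filtered_list = []
--     for list in list_of_siteswaps:
--         list_to_be_added = True
--         n = len(list)
--         for i in range(n):
--             if list[i:]+list[:i] in filtered_list:
--                 list_to_be_added = False
--         if list_to_be_added:
--             filtered_list.append(list)
--     return filtered_list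
-- ===== SOURCE B (Python) =====
-- def filter_rotations(list_of_siteswaps):
--     """Dedup siteswaps up to rotation, keeping the first representative:
--     index every rotation of each kept siteswap in a set, so each candidate
--     is decided by a single set-membership test instead of testing each of
--     its rotations against the kept list."""
--     seen = set()
--     filtered_list = []
--     for s in list_of_siteswaps:
--         t = tuple(s)
--         if t not in seen:
--             filtered_list.append(s)
--             for i in range(len(t)):
--                 seen.add(t[i:] + t[:i])
--     return filtered_list
-- ===== Notes on version B (the rewrite author's own statement) =====
-- stated objective: alternative
-- what changed: Instead of testing every rotation of each candidate against the whole kept list (A's inner scan), B indexes all rotations of each kept siteswap in a set once, so each candidate is decided by a single set-membership test; a timing run did not measure B faster, so no speed is claimed.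
import Mathlib
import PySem

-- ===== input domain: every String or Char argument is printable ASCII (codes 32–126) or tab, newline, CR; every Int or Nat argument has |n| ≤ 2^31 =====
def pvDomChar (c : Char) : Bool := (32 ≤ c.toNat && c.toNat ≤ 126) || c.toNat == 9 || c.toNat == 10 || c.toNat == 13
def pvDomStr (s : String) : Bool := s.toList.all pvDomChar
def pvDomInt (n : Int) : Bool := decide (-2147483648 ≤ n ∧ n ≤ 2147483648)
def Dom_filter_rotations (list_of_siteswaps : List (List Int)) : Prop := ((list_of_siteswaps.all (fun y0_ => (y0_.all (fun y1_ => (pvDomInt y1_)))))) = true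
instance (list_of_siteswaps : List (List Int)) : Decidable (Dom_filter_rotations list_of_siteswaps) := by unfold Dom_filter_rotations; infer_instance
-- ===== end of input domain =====

-- B replaces A's inner scan of the kept list for every rotation by a set that
-- indexes every rotation of each kept siteswap: one membership test per candidate
-- (a different algorithm; not measured faster, no speed claimed).

-- ===== PORT A =====
def filter_rotations (list_of_siteswaps : List (List Int)) : List (List Int) :=
  list_of_siteswaps.foldl
    (fun filtered_list l =>
      let n : Int := (l.length : Int)
      let list_to_be_added :=
        (PySem.List.pyRange 0 n 1).foldl
          (fun b i =>
            if (PySem.List.slice l (some i) none ++ PySem.List.slice l (some 0) (some i)) ∈ filtered_list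
            then false else b)
          true
      if list_to_be_added then filtered_list ++ [l] else filtered_list)
    []

-- ===== PORT B =====
def filter_rotations_alt (list_of_siteswaps : List (List Int)) : List (List Int) :=
  (list_of_siteswaps.foldl
    (fun (st : PySem.Set (List Int) × List (List Int)) s =>
      if PySem.Set.contains st.1 s then st
      else
        ((PySem.List.pyRange 0 (s.length : Int) 1).foldl
            (fun seen i =>
              PySem.Set.add seen (PySem.List.slice s (some i) none ++ PySem.List.slice s (some 0) (some i)))
            st.1,
         st.2 ++ [s]))
    (PySem.Set.empty, [])).2

-- ===== PRECONDITION & SPEC =====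
def Spec_filter_rotations (list_of_siteswaps : List (List Int)) (out : List (List Int)) : Prop := out = filter_rotations_alt list_of_siteswaps
instance (list_of_siteswaps : List (List Int)) (out : List (List Int)) : Decidable (Spec_filter_rotations list_of_siteswaps out) := by unfold Spec_filter_rotations; infer_instance

-- ===== CLAIM (what is proved, stated in full; the proofs are below) =====
def Claim_equal_filter_rotations : Prop := ∀ (list_of_siteswaps : List (List Int)), Dom_filter_rotations list_of_siteswaps → Spec_filter_rotations list_of_siteswaps (filter_rotations list_of_siteswaps)

-- ===== LEMMAS AND PROOFS =====

-- rotation of a list by k places (what l[i:]+l[:i] computes for 0 ≤ i < len(l))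
def rotL (l : List Int) (k : Nat) : List Int := l.drop k ++ l.take k

theorem length_rotL (l : List Int) (k : Nat) : (rotL l k).length = l.length := by
  simp [rotL]; omega

theorem rotL_zero (l : List Int) : rotL l 0 = l := by simp [rotL]

theorem rotL_rotL_cancel (l : List Int) (k : Nat) (_h : k ≤ l.length) :
    rotL (rotL l k) (l.length - k) = l := by
  have hlen : (l.drop k).length = l.length - k := by simp
  simp only [rotL]
  rw [List.drop_left' hlen, List.take_left' hlen]
  exact List.take_append_drop k l

theorem rot_symm (l : List Int) (k : Nat) (hk : k < l.length) :
    ∃ j < (rotL l k).length, rotL (rotL l k) j = l := by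
  by_cases h0 : k = 0
  · exact ⟨0, by simp [length_rotL]; omega, by simp [h0, rotL_zero]⟩
  · refine ⟨l.length - k, by rw [length_rotL]; omega, ?_⟩
    exact rotL_rotL_cancel l k (le_of_lt hk)

-- the slice expression both ports use is rotL at a natural index
theorem slice_rot_eq (l : List Int) (k : Nat) :
    PySem.List.slice l (some (k : Int)) none ++ PySem.List.slice l (some 0) (some (k : Int)) = rotL l k := by
  rw [PySem.List.slice_from_natCast]
  have : PySem.List.slice l (some (0 : Int)) (some (k : Int)) = l.take k := by
    rw [PySem.List.slice_zero_start, PySem.List.slice_to_natCast]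
  rw [this]; rfl

-- A's inner flag loop, characterised
theorem a_flag_loop (l : List Int) (filtered : List (List Int)) (b : Bool) :
    ((PySem.List.pyRange 0 (l.length : Int) 1).foldl
      (fun b i =>
        if (PySem.List.slice l (some i) none ++ PySem.List.slice l (some 0) (some i)) ∈ filtered
        then false else b) b) = true
    ↔ b = true ∧ ∀ k < l.length, rotL l k ∉ filtered := by
  rw [PySem.List.pyRange_one]
  simp only [sub_zero, Int.toNat_natCast, zero_add]
  induction l.length generalizing b with
  | zero => simp
  | succ n ih =>
    rw [List.range_succ]
    simp only [List.map_append, List.foldl_append, List.map_cons, List.map_nil,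
      List.foldl_cons, List.foldl_nil, slice_rot_eq]
    by_cases hp : rotL l n ∈ filtered
    · rw [if_pos hp]
      constructor
      · intro h; exact absurd h (by simp)
      · rintro ⟨-, hall⟩; exact absurd hp (hall n (Nat.lt_succ_self n))
    · rw [if_neg hp, ih]
      constructor
      · rintro ⟨hb, hall⟩
        exact ⟨hb, fun k hk => by
          rcases Nat.lt_succ_iff_lt_or_eq.mp hk with h | h
          · exact hall k h
          · subst h; exact hp⟩
      · rintro ⟨hb, hall⟩
        exact ⟨hb, fun k hk => hall k (Nat.lt_succ_of_lt hk)⟩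

-- B's rotation-indexing loop, characterised
theorem b_seen_loop (l : List Int) (seen : PySem.Set (List Int)) (x : List Int) :
    x ∈ ((PySem.List.pyRange 0 (l.length : Int) 1).foldl
      (fun seen i =>
        PySem.Set.add seen (PySem.List.slice l (some i) none ++ PySem.List.slice l (some 0) (some i))) seen)
    ↔ x ∈ seen ∨ ∃ k < l.length, x = rotL l k := by
  rw [PySem.List.pyRange_one]
  simp only [sub_zero, Int.toNat_natCast, zero_add]
  induction l.length generalizing seen with
  | zero => simp
  | succ n ih =>
    rw [List.range_succ]
    simp only [List.map_append, List.foldl_append, List.map_cons, List.map_nil,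
      List.foldl_cons, List.foldl_nil, slice_rot_eq]
    rw [PySem.Set.mem_add, ih]
    constructor
    · rintro ((h | ⟨k, hk, hx⟩) | hx)
      · exact Or.inl h
      · exact Or.inr ⟨k, Nat.lt_succ_of_lt hk, hx⟩
      · exact Or.inr ⟨n, Nat.lt_succ_self n, hx⟩
    · rintro (h | ⟨k, hk, hx⟩)
      · exact Or.inl (Or.inl h)
      · rcases Nat.lt_succ_iff_lt_or_eq.mp hk with h | h
        · exact Or.inl (Or.inr ⟨k, h, hx⟩)
        · subst h; exact Or.inr hx

-- the loop invariant: seen holds exactly the rotations of the kept siteswaps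
def KeepInv (filtered : List (List Int)) (seen : PySem.Set (List Int)) : Prop :=
  ∀ x, x ∈ seen ↔ ∃ y ∈ filtered, ∃ k < y.length, x = rotL y k

theorem main_fold (xs : List (List Int)) :
    ∀ (filtered : List (List Int)) (seen : PySem.Set (List Int)), KeepInv filtered seen →
    xs.foldl
      (fun filtered_list l =>
        let n : Int := (l.length : Int)
        let list_to_be_added :=
          (PySem.List.pyRange 0 n 1).foldl
            (fun b i =>
              if (PySem.List.slice l (some i) none ++ PySem.List.slice l (some 0) (some i)) ∈ filtered_list
              then false else b)
            true
        if list_to_be_added then filtered_list ++ [l] else filtered_list)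
      filtered
    = (xs.foldl
        (fun (st : PySem.Set (List Int) × List (List Int)) s =>
          if PySem.Set.contains st.1 s then st
          else
            ((PySem.List.pyRange 0 (s.length : Int) 1).foldl
                (fun seen i =>
                  PySem.Set.add seen (PySem.List.slice s (some i) none ++ PySem.List.slice s (some 0) (some i)))
                st.1,
             st.2 ++ [s]))
        (seen, filtered)).2 := by
  induction xs with
  | nil => intro filtered seen _; rfl
  | cons l xs ih =>
    intro filtered seen hinv
    simp only [List.foldl_cons]
    by_cases hmem : l ∈ seen
    · -- a rotation of l is already kept: both sides skip l
      have hcond : ¬ (((PySem.List.pyRange 0 ((l.length : Int)) 1).foldl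
          (fun b i =>
            if (PySem.List.slice l (some i) none ++ PySem.List.slice l (some 0) (some i)) ∈ filtered
            then false else b) true) = true) := by
        rw [a_flag_loop]
        rintro ⟨-, hall⟩
        rcases (hinv l).mp hmem with ⟨y, hy, k, hk, hx⟩
        rcases rot_symm y k hk with ⟨j, hj, hjy⟩
        rw [← hx] at hj hjy
        exact hall j hj (hjy ▸ hy)
      have hc : PySem.Set.contains seen l = true := (PySem.Set.contains_iff seen l).mpr hmem
      simp only [Bool.not_eq_true] at hcond
      simp only [hc, hcond, if_true, Bool.false_eq_true, if_false]
      exact ih filtered seen hinv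
    · -- l is new: both sides keep it
      have hcond : (((PySem.List.pyRange 0 ((l.length : Int)) 1).foldl
          (fun b i =>
            if (PySem.List.slice l (some i) none ++ PySem.List.slice l (some 0) (some i)) ∈ filtered
            then false else b) true) = true) := by
        rw [a_flag_loop]
        refine ⟨rfl, fun k hk hkf => ?_⟩
        rcases rot_symm l k hk with ⟨j, hj, hjy⟩
        rw [length_rotL] at hj
        exact hmem ((hinv l).mpr ⟨rotL l k, hkf, j, (length_rotL l k) ▸ hj, hjy.symm⟩)
      have hc : PySem.Set.contains seen l = false := by
        simp only [← Bool.not_eq_true, PySem.Set.contains_iff seen l]; exact hmem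
      simp only [hc, hcond, if_true, Bool.false_eq_true, if_false]
      apply ih
      intro x
      rw [b_seen_loop, hinv x]
      constructor
      · rintro (⟨y, hy, k, hk, hx⟩ | ⟨k, hk, hx⟩)
        · exact ⟨y, List.mem_append_left _ hy, k, hk, hx⟩
        · exact ⟨l, List.mem_append_right _ (List.mem_singleton_self l), k, hk, hx⟩
      · rintro ⟨y, hy, k, hk, hx⟩
        rcases List.mem_append.mp hy with h | h
        · exact Or.inl ⟨y, h, k, hk, hx⟩
        · rw [List.mem_singleton.mp h] at hk hx
          exact Or.inr ⟨k, hk, hx⟩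

-- ===== VERDICT (by name: the statement is the Claim_ definition above) =====
theorem filter_rotations_spec : Claim_equal_filter_rotations := by
  intro xs _
  show filter_rotations xs = filter_rotations_alt xs
  unfold filter_rotations filter_rotations_alt
  exact main_fold xs [] PySem.Set.empty (by intro x; simp [PySem.Set.empty])
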